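-- pv_equiv track=rewrite | github.com/NaToky/advent_of_code_2025 | day2_p2.py | parts_equal
-- ===== SOURCE A (Python) =====
-- def parts_equal(val: str, n: int) -> bool:
--     if len(val) % n != 0:
--         return False
--
--     part_len = len(val) // n
--     first = val[:part_len]
--
--     for i in range(1, n):
--         if val[i*part_len:(i+1)*part_len] != first:
--             return False
--
--     return True
-- ===== SOURCE B (Python) =====
-- def parts_equal(val: str, n: int) -> bool:
--     # Periodicity check: val consists of n identical parts iff n divides
--     # len(val) and shifting val by one part length leaves it unchanged,
--     # i.e. val[part_len:] == val[:len(val)-part_len].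
--     if len(val) % n != 0:
--         return False
--     part_len = len(val) // n
--     return val[part_len:] == val[:len(val) - part_len]
-- ===== Notes on version B (the rewrite author's own statement) =====
-- stated objective: alternative
-- what changed: Replaces the per-chunk slicing loop with a single periodicity test: val splits into n equal parts iff n divides len(val) and val shifted by one part length equals itself, i.e. val[part_len:] == val[:len(val)-part_len]; no chunks are enumerated or compared.
-- intended difference: For n <= -2 dividing len(val) with val nonempty, A returns True (its range(1,n) loop is empty) while B returns False; a nonempty string cannot split into a negative number of parts, so B's value is the intended one. — e.g. on parts_equal("ab", -2): A returns true, B returns false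
import Mathlib
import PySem

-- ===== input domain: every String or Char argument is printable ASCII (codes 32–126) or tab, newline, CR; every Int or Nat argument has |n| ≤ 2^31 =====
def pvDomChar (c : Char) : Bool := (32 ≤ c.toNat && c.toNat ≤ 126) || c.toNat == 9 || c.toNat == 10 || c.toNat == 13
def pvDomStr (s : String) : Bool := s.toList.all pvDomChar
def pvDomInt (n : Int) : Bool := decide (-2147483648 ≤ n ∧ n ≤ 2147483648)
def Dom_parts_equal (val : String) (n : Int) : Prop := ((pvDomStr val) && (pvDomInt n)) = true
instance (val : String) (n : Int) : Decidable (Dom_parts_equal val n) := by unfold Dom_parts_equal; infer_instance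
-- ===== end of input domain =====

-- B replaces A's per-chunk comparison loop with a single periodicity test (val[p:] == val[:len-p]); alternative algorithm, same cost.

-- ===== PORT A =====
def parts_equal (val : String) (n : Int) : Bool :=
  if PySem.Int.mod (PySem.Str.len val) n ≠ 0 then false
  else
    let part_len := PySem.Int.floordiv (PySem.Str.len val) n
    let first := PySem.List.slice val.toList none (some part_len)
    (PySem.List.pyRange 1 n 1).all
      (fun i => PySem.List.slice val.toList (some (i * part_len)) (some ((i + 1) * part_len)) == first)

-- ===== PORT B =====
def parts_equal_alt (val : String) (n : Int) : Bool :=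
  if PySem.Int.mod (PySem.Str.len val) n ≠ 0 then false
  else
    let part_len := PySem.Int.floordiv (PySem.Str.len val) n
    PySem.List.slice val.toList (some part_len) none ==
      PySem.List.slice val.toList none (some (PySem.Str.len val - part_len))

-- ===== PRECONDITION & SPEC =====
-- Pre_ excludes only n = 0, where the Python A raises ZeroDivisionError (B raises there too).
def Pre_parts_equal (val : String) (n : Int) : Prop := n ≠ 0

instance (val : String) (n : Int) : Decidable (Pre_parts_equal val n) := by
  unfold Pre_parts_equal; infer_instance

def pvWitness_parts_equal : String × Int := ("abab", 2)

-- For n ≤ -2 dividing len(val) with val nonempty, A returns True (its range(1,n) loop is empty)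
-- while B returns False, the intended answer: a nonempty string never splits into a negative
-- number of identical parts.
def D_parts_equal (val : String) (n : Int) : Prop :=
  n < -1 ∧ val.toList ≠ [] ∧ n ∣ (val.toList.length : Int)

instance (val : String) (n : Int) : Decidable (D_parts_equal val n) := by
  unfold D_parts_equal; infer_instance

def Spec_parts_equal (val : String) (n : Int) (out : Bool) : Prop :=
  ¬ D_parts_equal val n → out = parts_equal_alt val n

instance (val : String) (n : Int) (out : Bool) : Decidable (Spec_parts_equal val n out) := by
  unfold Spec_parts_equal; infer_instance

def pvDiffWitness_parts_equal : String × Int := ("ab", -2)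
def pvDiffWitnessOut_parts_equal : Bool × Bool := (true, false)

-- ===== CLAIM (what is proved, stated in full; the proofs are below) =====
def Claim_unchanged_parts_equal : Prop := ∀ (val : String) (n : Int), Dom_parts_equal val n → Pre_parts_equal val n → Spec_parts_equal val n (parts_equal val n)
def Claim_changed_parts_equal : Prop := Dom_parts_equal (pvDiffWitness_parts_equal.1) (pvDiffWitness_parts_equal.2) ∧ Pre_parts_equal (pvDiffWitness_parts_equal.1) (pvDiffWitness_parts_equal.2) ∧ D_parts_equal (pvDiffWitness_parts_equal.1) (pvDiffWitness_parts_equal.2) ∧ parts_equal (pvDiffWitness_parts_equal.1) (pvDiffWitness_parts_equal.2) = pvDiffWitnessOut_parts_equal.1 ∧ parts_equal_alt (pvDiffWitness_parts_equal.1) (pvDiffWitness_parts_equal.2) = pvDiffWitnessOut_parts_equal.2 ∧ pvDiffWitnessOut_parts_equal.1 ≠ pvDiffWitnessOut_parts_equal.2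
def Claim_exact_parts_equal : Prop := ∀ (val : String) (n : Int), Dom_parts_equal val n → Pre_parts_equal val n → D_parts_equal val n → parts_equal val n ≠ parts_equal_alt val n

-- ===== LEMMAS AND PROOFS =====

-- Every p-chunk of L equals F  ↔  L is n copies of F.
theorem rep_iff (p : Nat) (F : List Char) (hF : F.length = p) :
    ∀ (n : Nat) (L : List Char), L.length = n * p →
      ((∀ i < n, (L.drop (i * p)).take p = F) ↔ L = (List.replicate n F).flatten) := by
  intro n
  induction n with
  | zero =>
      intro L hL
      simp only [Nat.zero_mul, List.length_eq_zero_iff] at hL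
      subst hL
      simp
  | succ n ih =>
      intro L hL
      have hdrop : (L.drop p).length = n * p := by
        simp only [List.length_drop, hL, Nat.succ_mul]; omega
      have ihL := ih (L.drop p) hdrop
      constructor
      · intro h
        have h0 : L.take p = F := by simpa using h 0 (Nat.succ_pos n)
        have hrest : L.drop p = (List.replicate n F).flatten := by
          refine ihL.mp ?_
          intro i hi
          have hh := h (i + 1) (by omega)
          have hdd : (L.drop p).drop (i * p) = L.drop ((i + 1) * p) := by
            rw [List.drop_drop]; ring_nf
          rw [hdd]
          exact hh
        calc L = L.take p ++ L.drop p := (List.take_append_drop p L).symm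
          _ = F ++ (List.replicate n F).flatten := by rw [h0, hrest]
          _ = (List.replicate (n + 1) F).flatten := by simp [List.replicate_succ]
      · intro h
        have hLsplit : L = F ++ (List.replicate n F).flatten := by
          simpa [List.replicate_succ] using h
        have h0 : L.take p = F := by
          rw [hLsplit, ← hF, List.take_left]
        have hdropF : L.drop p = (List.replicate n F).flatten := by
          rw [hLsplit, ← hF, List.drop_left]
        intro i hi
        cases i with
        | zero => simpa using h0
        | succ i =>
            have hdd : (L.drop ((i + 1) * p)).take p = ((L.drop p).drop (i * p)).take p := by
              rw [List.drop_drop]; ring_nf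
            rw [hdd]
            exact (ihL.mpr hdropF) i (by omega)

-- take of n copies out of n+1 copies.
theorem take_flatten_replicate (F : List Char) (n : Nat) :
    ((List.replicate (n + 1) F).flatten).take (n * F.length) = (List.replicate n F).flatten := by
  induction n with
  | zero => simp
  | succ m ih =>
      rw [List.replicate_succ, List.flatten_cons, List.take_append,
        List.take_of_length_le (Nat.le_mul_of_pos_left F.length (Nat.succ_pos m)),
        show (m + 1) * F.length - F.length = m * F.length by rw [Nat.succ_mul]; omega,
        ih, List.replicate_succ, List.flatten_cons]

-- Shift-by-p periodicity  ↔  L is n copies of its first p characters.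
theorem period_iff (p : Nat) :
    ∀ (n : Nat) (L : List Char), L.length = n * p →
      ((L.drop p = L.take (L.length - p)) ↔ L = (List.replicate n (L.take p)).flatten) := by
  intro n
  induction n with
  | zero =>
      intro L hL
      simp only [Nat.zero_mul, List.length_eq_zero_iff] at hL
      subst hL
      simp
  | succ n ih =>
      intro L hL
      have hF : (L.take p).length = p := by
        rw [List.length_take, hL]
        exact Nat.min_eq_left (by rw [Nat.succ_mul]; omega)
      have htp : L.length - p = n * p := by rw [hL, Nat.succ_mul]; omega
      constructor
      · intro h
        rw [htp] at h
        rcases Nat.eq_zero_or_pos n with hn0 | hn1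
        · subst hn0
          have hLp : L.length = p := by omega
          rw [← hLp, List.take_length]
          simp
        · have hple : p ≤ n * p := Nat.le_mul_of_pos_left p hn1
          have hdrop : (L.drop p).length = n * p := by
            simp only [List.length_drop, hL, Nat.succ_mul]; omega
          have hper : (L.drop p).drop p = (L.drop p).take ((L.drop p).length - p) :=
            calc (L.drop p).drop p = (L.take (n * p)).drop p := by rw [h]
              _ = (L.drop p).take (n * p - p) := List.drop_take
              _ = (L.drop p).take ((L.drop p).length - p) := by rw [hdrop]
          have hrest := (ih (L.drop p) hdrop).mp hper
          have hfirst : (L.drop p).take p = L.take p := by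
            rw [h, List.take_take, Nat.min_eq_left hple]
          rw [hfirst] at hrest
          calc L = L.take p ++ L.drop p := (List.take_append_drop p L).symm
            _ = L.take p ++ (List.replicate n (L.take p)).flatten := by rw [← hrest]
            _ = (List.replicate (n + 1) (L.take p)).flatten := by simp [List.replicate_succ]
      · intro h
        obtain ⟨F, hFdef⟩ : ∃ F, L.take p = F := ⟨_, rfl⟩
        rw [hFdef] at h hF
        have hLsplit : L = F ++ (List.replicate n F).flatten := by
          simpa [List.replicate_succ] using h
        have hdropF : L.drop p = (List.replicate n F).flatten := by
          conv_lhs => rw [hLsplit]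
          rw [← hF, List.drop_left]
        have htake : L.take (L.length - p) = (List.replicate n F).flatten := by
          rw [htp]
          conv_lhs => rw [h]
          rw [show n * p = n * F.length by rw [hF]]
          exact take_flatten_replicate F n
        rw [hdropF, htake]

-- The two reduced bodies agree for positive N when the length is N * P.
theorem pos_core (L : List Char) (N P : Nat) (hN : 1 ≤ N) (hlen : L.length = N * P) :
    ((PySem.List.pyRange 1 (N : Int)).all
        (fun i => PySem.List.slice L (some (i * (P : Int))) (some ((i + 1) * (P : Int)))
          == PySem.List.slice L none (some (P : Int))))
      = (PySem.List.slice L (some (P : Int)) none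
          == PySem.List.slice L none (some ((L.length : Int) - (P : Int)))) := by
  have hF : (L.take P).length = P := by
    rw [List.length_take, hlen]
    exact Nat.min_eq_left (Nat.le_mul_of_pos_left P hN)
  have hiff := rep_iff P (L.take P) hF N L hlen
  have hpiff := period_iff P N L hlen
  have hslice : ∀ k : Nat,
      PySem.List.slice L (some ((1 + (k : Int)) * (P : Int))) (some ((1 + (k : Int) + 1) * (P : Int)))
        = (L.drop ((1 + k) * P)).take P := by
    intro k
    have h1 : (1 + (k : Int)) * (P : Int) = (((1 + k) * P : Nat) : Int) := by push_cast; ring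
    have h2 : (1 + (k : Int) + 1) * (P : Int) = (((1 + k) * P : Nat) : Int) + (P : Int) := by
      push_cast; ring
    rw [h1, h2]
    exact PySem.List.slice_natCast_add L ((1 + k) * P) P
  have hPle : P ≤ L.length := by rw [hlen]; exact Nat.le_mul_of_pos_left P hN
  have hcast : (L.length : Int) - (P : Int) = ((L.length - P : Nat) : Int) := by
    push_cast [hPle]; ring
  rw [PySem.List.slice_to_natCast, PySem.List.slice_from_natCast, hcast,
    PySem.List.slice_to_natCast, PySem.List.pyRange_one]
  rw [Bool.eq_iff_iff]
  simp only [List.all_map, List.all_eq_true, List.mem_range, Function.comp, beq_iff_eq]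
  constructor
  · intro h
    refine hpiff.mpr (hiff.mp ?_)
    intro i hi
    cases i with
    | zero => simp
    | succ i =>
        have hk : i < ((N : Int) - 1).toNat := by omega
        have hh := h i hk
        rw [hslice i] at hh
        simpa [Nat.add_comm] using hh
  · intro h k hk
    rw [hslice k]
    exact (hiff.mpr (hpiff.mp h)) (1 + k) (by omega)

-- The ports agree for every positive divisor-count N.
theorem pos_case (val : String) (N : Nat) (hN : 1 ≤ N)
    (hdvd : (N : Int) ∣ (val.toList.length : Int)) :
    parts_equal val (N : Int) = parts_equal_alt val (N : Int) := by
  have hmod : PySem.Int.mod (PySem.Str.len val) (N : Int) = 0 :=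
    (PySem.Int.mod_eq_zero_iff_dvd _ _).mpr (by simpa [PySem.Str.len] using hdvd)
  have hdvdN : N ∣ val.toList.length := by exact_mod_cast hdvd
  have hlen : val.toList.length = N * (val.toList.length / N) :=
    (Nat.mul_div_cancel' hdvdN).symm
  have hfd : PySem.Int.floordiv ((val.toList.length : Nat) : Int) (N : Int)
      = ((val.toList.length / N : Nat) : Int) :=
    PySem.Int.floordiv_natCast val.toList.length N
  have hslen : PySem.Str.len val = (val.toList.length : Int) := by simp [PySem.Str.len]
  unfold parts_equal parts_equal_alt
  rw [if_neg (not_not_intro hmod), if_neg (not_not_intro hmod)]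
  simp only [hslen, hfd]
  exact pos_core val.toList N (val.toList.length / N) hN hlen

-- ===== VERDICT (by name: the statement is the Claim_ definition above) =====
theorem parts_equal_spec : Claim_unchanged_parts_equal := by
  intro val n _hdom hpre hnd
  show parts_equal val n = parts_equal_alt val n
  by_cases hmod : PySem.Int.mod (PySem.Str.len val) n = 0
  · have hdvd : n ∣ (val.toList.length : Int) := by
      have := (PySem.Int.mod_eq_zero_iff_dvd (PySem.Str.len val) n).mp hmod
      simpa [PySem.Str.len] using this
    rcases lt_trichotomy n 0 with hneg | hzero | hpos
    · -- negative n: outside D_, either n = -1 or val = []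
      unfold parts_equal parts_equal_alt
      rw [if_neg (not_not_intro hmod), if_neg (not_not_intro hmod)]
      rw [PySem.List.pyRange_one_eq_nil (by omega)]
      by_cases hnil : val.toList = []
      · simp [hnil, PySem.List.slice]
      · have hn1 : n = -1 := by
          rcases lt_or_ge n (-1) with h1 | h1
          · exact absurd ⟨h1, hnil, hdvd⟩ hnd
          · omega
        subst hn1
        have hm : PySem.Str.len val = (val.toList.length : Int) := by simp [PySem.Str.len]
        set m : Nat := val.toList.length with hmdef
        have hfd : PySem.Int.floordiv ((m : Int)) (-1) = -(m : Int) := by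
          have h1 := PySem.Int.floordiv_mul_add_mod ((m : Int)) (-1)
          have h2 : PySem.Int.mod ((m : Int)) (-1) = 0 := by rw [← hm]; exact hmod
          rw [h2] at h1
          omega
        have hfrom : PySem.List.slice val.toList (some (-(m : Int))) none = val.toList := by
          rcases Nat.eq_zero_or_pos m with h0 | h0
          · rw [show -((m : Int)) = ((0 : Nat) : Int) by omega]
            rw [PySem.List.slice_from_natCast]
            simp
          · rw [PySem.List.slice_from_neg_natCast val.toList m h0]
            simp [hmdef]
        have hto : PySem.List.slice val.toList none (some ((m : Int) + (m : Int))) = val.toList := by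
          rw [PySem.List.slice_to val.toList (by omega)]
          apply List.take_of_length_le
          omega
        rw [hm, hfd]
        simp [hfrom, hto]
    · exact absurd hzero hpre
    · obtain ⟨N, rfl⟩ : ∃ N : Nat, n = (N : Int) := ⟨n.toNat, (Int.toNat_of_nonneg hpos.le).symm⟩
      exact pos_case val N (by exact_mod_cast hpos) hdvd
  · unfold parts_equal parts_equal_alt
    rw [if_pos hmod, if_pos hmod]

theorem parts_equal_changed : Claim_changed_parts_equal := by
  unfold Claim_changed_parts_equal; decide

theorem parts_equal_tight : Claim_exact_parts_equal := by
  intro val n _hdom _hpre hD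
  obtain ⟨hneg, hne, hdvd⟩ := hD
  have hm : PySem.Str.len val = (val.toList.length : Int) := by simp [PySem.Str.len]
  set m : Nat := val.toList.length with hmdef
  have hm1 : 1 ≤ m := by
    have hne' : val.toList.length ≠ 0 := fun h0 => hne (List.eq_nil_of_length_eq_zero h0)
    omega
  have hmod : PySem.Int.mod (PySem.Str.len val) n = 0 :=
    (PySem.Int.mod_eq_zero_iff_dvd _ _).mpr (by rw [hm]; exact hdvd)
  -- d := m // n is negative, d = -q with 1 ≤ q and 2*q ≤ m
  obtain ⟨c, hc⟩ := hdvd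
  have hmodm : PySem.Int.mod ((m : Int)) n = 0 := by rw [← hm]; exact hmod
  have h1 := PySem.Int.floordiv_mul_add_mod ((m : Int)) n
  rw [hmodm, add_zero] at h1
  have hd : PySem.Int.floordiv ((m : Int)) n = c := by
    have h2 : PySem.Int.floordiv ((m : Int)) n * n = c * n := by rw [h1, hc]; ring
    exact mul_right_cancel₀ (by omega : n ≠ 0) h2
  have hcneg : c < 0 := by nlinarith [hc, hm1, hneg]
  set q : Nat := (-c).toNat with hqdef
  have hq : (q : Int) = -c := by omega
  have hq1 : 1 ≤ q := by omega
  have h2q : 2 * q ≤ m := by nlinarith [hc, hq, hneg]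
  have hA : parts_equal val n = true := by
    unfold parts_equal
    rw [if_neg (not_not_intro hmod)]
    rw [PySem.List.pyRange_one_eq_nil (by omega)]
    simp
  have hB : parts_equal_alt val n = false := by
    unfold parts_equal_alt
    rw [if_neg (not_not_intro hmod), hm, hd, show c = -(q : Int) by omega]
    show (PySem.List.slice val.toList (some (-(q : Int))) none ==
      PySem.List.slice val.toList none (some ((m : Int) - -(q : Int)))) = false
    rw [PySem.List.slice_from_neg_natCast val.toList q (by omega)]
    rw [PySem.List.slice_to val.toList (by omega)]
    rw [beq_eq_false_iff_ne]
    intro hcontra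
    apply_fun List.length at hcontra
    simp only [List.length_drop, List.length_take, hmdef] at hcontra
    omega
  rw [hA, hB]
  simp
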